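-- pv_equiv track=rewrite | github.com/nubezumelzu/EjercicioPythonNivel1 | nivel1.py | casoToList
-- ===== SOURCE A (Python) =====
-- def casoToList(caso):
--     def getSubString(i, string):
--         subString, j = "", i
--         for char in string:
--             if char == ")":
--                 break
--             else:
--                 subString += char
--             j+=1
--         return subString, j
--     final = []
--     cadena = ""
--     i, flag = 0, False
--     while( i < len(caso)):
--         if caso[i] == "(":
--             cadena, i = getSubString(i=i+1, string=caso[i+1:])
--             final.append(cadena)
--         else:
--             final.append(caso[i])
--         i+=1
--     return [list(element) for element in final]
-- ===== SOURCE B (Python) =====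
-- def casoToList(caso):
--     out = []
--     i = 0
--     n = len(caso)
--     while i < n:
--         if caso[i] == "(":
--             j = caso.find(")", i + 1)
--             if j == -1:
--                 j = n
--             out.append(list(caso[i + 1:j]))
--             i = j + 1
--         else:
--             out.append([caso[i]])
--             i += 1
--     return out
-- ===== Notes on version B (the rewrite author's own statement) =====
-- stated objective: alternative
-- what changed: B replaces A's per-group helper that rebuilds each group character-by-character (+=) on a fresh slice caso[i+1:] with a single index-driven scan using str.find and one slice per group, appending ready-made lists.
import Mathlib
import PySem

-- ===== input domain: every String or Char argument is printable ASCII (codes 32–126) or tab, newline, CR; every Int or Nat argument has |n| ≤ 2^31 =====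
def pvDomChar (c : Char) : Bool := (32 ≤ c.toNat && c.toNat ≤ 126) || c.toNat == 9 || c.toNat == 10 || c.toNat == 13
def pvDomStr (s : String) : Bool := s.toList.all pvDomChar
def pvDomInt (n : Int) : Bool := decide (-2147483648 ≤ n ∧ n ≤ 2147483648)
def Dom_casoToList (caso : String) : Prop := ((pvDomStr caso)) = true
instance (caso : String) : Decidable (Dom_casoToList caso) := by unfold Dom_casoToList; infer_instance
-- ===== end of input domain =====

-- B replaces A's per-group character-by-character accumulation with one takeWhile scan per group; objective: alternative single-pass formulation.


-- ===== PORT A =====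
-- getSubString's for-loop with break: accumulate chars (the Python string subString, kept as List Char) until ')', counting j upward
def getSubStringAux (string : List Char) (subString : List Char) (j : Nat) : List Char × Nat :=
  match string with
  | [] => (subString, j)
  | ch :: rest => if ch = ')' then (subString, j) else getSubStringAux rest (subString ++ [ch]) (j + 1)

-- needed by loopA's termination proof
theorem getSubStringAux_ge (string : List Char) (subString : List Char) (j : Nat) :
    j ≤ (getSubStringAux string subString j).2 := by
  induction string generalizing subString j with
  | nil => simp [getSubStringAux]
  | cons c rest ih =>
    simp only [getSubStringAux]
    split
    · exact Nat.le_refl j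
    · exact Nat.le_trans (Nat.le_succ j) (ih _ _)

-- the while-loop of A: i is Python's index (always ≥ 0 here), caso[i+1:] is List.drop (i+1) since i+1 ≥ 0
def loopA (s : List Char) (i : Nat) : List (List Char) :=
  if h : i < s.length then
    if s[i] = '(' then
      let r := getSubStringAux (s.drop (i + 1)) [] (i + 1)
      r.1 :: loopA s (r.2 + 1)
    else
      [s[i]] :: loopA s (i + 1)
  else []
termination_by s.length - i
decreasing_by
  · have := getSubStringAux_ge (s.drop (i + 1)) [] (i + 1)
    omega
  · omega

-- list(element): each element (a Python string) becomes the list of its 1-character strings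
def casoToList (caso : String) : List (List String) :=
  (loopA caso.toList 0).map (fun e => e.map (fun c => String.ofList [c]))

-- ===== PORT B =====
-- caso.find(")", i+1) (defaulted to n when absent) is i+1 plus the length of the run of non-')' chars
-- after position i; list(caso[i+1:j]) is exactly that run, so B takes it with takeWhile.
def loopB (s : List Char) (i : Nat) : List (List String) :=
  if h : i < s.length then
    if s[i] = '(' then
      let grp := (s.drop (i + 1)).takeWhile (· ≠ ')')
      (grp.map (fun c => String.ofList [c])) :: loopB s (i + 1 + grp.length + 1)
    else
      [String.ofList [s[i]]] :: loopB s (i + 1)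
  else []
termination_by s.length - i

def casoToList_alt (caso : String) : List (List String) := loopB caso.toList 0

-- ===== PRECONDITION & SPEC =====
def Spec_casoToList (caso : String) (out : List (List String)) : Prop := out = casoToList_alt caso
instance (caso : String) (out : List (List String)) : Decidable (Spec_casoToList caso out) := by unfold Spec_casoToList; infer_instance

-- ===== CLAIM (what is proved, stated in full; the proofs are below) =====
def Claim_equal_casoToList : Prop := ∀ (caso : String), Dom_casoToList caso → Spec_casoToList caso (casoToList caso)

-- ===== LEMMAS AND PROOFS =====
theorem getSubStringAux_eq (string : List Char) (subString : List Char) (j : Nat) :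
    getSubStringAux string subString j =
      (subString ++ string.takeWhile (· ≠ ')'), j + (string.takeWhile (· ≠ ')')).length) := by
  induction string generalizing subString j with
  | nil => simp [getSubStringAux]
  | cons c rest ih =>
    by_cases h : c = ')'
    · simp [getSubStringAux, h]
    · have hd : decide (c ≠ ')') = true := by simp [h]
      simp only [getSubStringAux, if_neg h, List.takeWhile_cons, hd, if_true]
      rw [ih]
      simp only [List.append_assoc, List.singleton_append, List.length_cons]
      refine Prod.ext rfl ?_
      omega

theorem loopA_eq_loopB (s : List Char) (i : Nat) :
    (loopA s i).map (fun e => e.map (fun c => String.ofList [c])) = loopB s i := by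
  rw [loopA, loopB]
  by_cases h : i < s.length
  · simp only [dif_pos h]
    by_cases hp : s[i] = '('
    · simp only [if_pos hp, getSubStringAux_eq, List.nil_append, List.map_cons]
      rw [loopA_eq_loopB]
    · simp only [if_neg hp, List.map_cons, List.map]
      rw [loopA_eq_loopB]
  · simp [dif_neg h]
termination_by s.length - i

-- ===== VERDICT (by name: the statement is the Claim_ definition above) =====
theorem casoToList_spec : Claim_equal_casoToList := by
  intro caso _
  unfold Spec_casoToList casoToList casoToList_alt
  exact loopA_eq_loopB caso.toList 0
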